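-- pv_equiv track=rewrite | github.com/yeongseon/excel-dbapi | src/excel_dbapi/parser/tokenizer.py | _split_qualified_identifier
-- ===== SOURCE A (Python) =====
-- def _split_qualified_identifier(token: str) -> list[str] | None:
--     value = token.strip()
--     if not value:
--         return None
--
--     in_double = False
--     dot_index = -1
--     index = 0
--     while index < len(value):
--         char = value[index]
--         if char == '"':
--             if in_double:
--                 if index + 1 < len(value) and value[index + 1] == '"':
--                     index += 2
--                     continue
--                 in_double = False
--                 index += 1
--                 continue
--             in_double = True
--             index += 1
--             continue
--
--         if char == "." and not in_double:
--             if dot_index >= 0: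
--                 return None
--             dot_index = index
--
--         index += 1
--
--     if in_double or dot_index <= 0 or dot_index >= len(value) - 1:
--         return None
--
--     left = value[:dot_index].strip()
--     right = value[dot_index + 1 :].strip()
--     if not left or not right:
--         return None
--     return [left, right]
-- ===== SOURCE B (Python) =====
-- def _find_closing_quote(value: str, j: int) -> int:
--     """First position k >= j holding the '"' that closes the quote opened before j
--     (skipping escaped '""' pairs); -1 if the quote never closes."""
--     while True:
--         k = value.find('"', j)
--         if k == -1 or k + 1 >= len(value) or value[k + 1] != '"':
--             return k
--         j = k + 2
--
--
-- def _split_qualified_identifier(token: str) -> list[str] | None: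
--     value = token.strip()
--     if not value:
--         return None
--     n = len(value)
--     # Phase 1: build a length-preserving masked copy with quoted spans overwritten by '#'.
--     masked_parts = []
--     i = 0
--     while i < n:
--         ch = value[i]
--         if ch == '"':
--             k = _find_closing_quote(value, i + 1)
--             if k == -1:
--                 return None  # unbalanced quotes
--             masked_parts.append('#' * (k - i + 1))
--             i = k + 1
--         else:
--             masked_parts.append(ch)
--             i += 1
--     masked = ''.join(masked_parts)
--     # Phase 2: the separator is the unique dot of the masked copy, strictly inside.
--     dots = [p for p, c in enumerate(masked) if c == '.']
--     if len(dots) != 1: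
--         return None
--     d = dots[0]
--     if d == 0 or d == n - 1:
--         return None
--     left = value[:d].strip()
--     right = value[d + 1:].strip()
--     if not left or not right:
--         return None
--     return [left, right]
-- ===== Notes on version B (the rewrite author's own statement) =====
-- stated objective: alternative
-- what changed: Replaces A's single fused scan (in_double flag, dot state, early return) by a two-phase decomposition: first build a length-preserving masked copy with each double-quoted span (including doubled-quote escapes) overwritten by a non-dot filler via a closing-quote search, then collect the dot positions of the masked copy and split the original at the unique interior dot.
import Mathlib
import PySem

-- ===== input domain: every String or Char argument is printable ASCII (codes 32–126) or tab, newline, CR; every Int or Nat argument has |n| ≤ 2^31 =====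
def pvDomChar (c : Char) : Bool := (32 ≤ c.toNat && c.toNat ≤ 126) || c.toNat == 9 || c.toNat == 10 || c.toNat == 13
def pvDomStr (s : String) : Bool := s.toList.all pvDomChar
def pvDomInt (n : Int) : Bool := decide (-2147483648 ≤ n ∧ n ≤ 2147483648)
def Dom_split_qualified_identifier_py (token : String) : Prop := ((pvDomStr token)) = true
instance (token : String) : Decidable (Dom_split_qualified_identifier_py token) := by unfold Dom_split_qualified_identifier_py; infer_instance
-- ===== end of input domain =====

-- B re-decomposes A's fused stateful scan into two phases (mask the quoted spans, then locate the
-- unique dot of the masked copy); same return value on every input, similar cost ("alternative").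

-- ===== PORT A =====
-- A's while-loop: state (index, in_double, dot_index); none = the early 'return None' on a second dot
def loopA (cs : List Char) (idx : Nat) (inDouble : Bool) (dotIndex : Int) : Option (Bool × Int) :=
  if h : idx < cs.length then
    let c := cs[idx]
    if c = '"' then
      if inDouble then
        if idx + 1 < cs.length ∧ cs.getD (idx + 1) ' ' = '"' then
          loopA cs (idx + 2) inDouble dotIndex
        else
          loopA cs (idx + 1) false dotIndex
      else
        loopA cs (idx + 1) true dotIndex
    else if c = '.' ∧ inDouble = false then
      if dotIndex ≥ 0 then none
      else loopA cs (idx + 1) inDouble (idx : Int)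
    else
      loopA cs (idx + 1) inDouble dotIndex
  else
    some (inDouble, dotIndex)
termination_by cs.length - idx
decreasing_by all_goals omega

def split_qualified_identifier_py (token : String) : Option (List String) :=
  let value := PySem.Chars.strip token.toList   -- token.strip(), on code points
  if value = [] then none
  else
    match loopA value 0 false (-1) with
    | none => none
    | some (inD, dotIndex) =>
      if inD || dotIndex ≤ 0 || dotIndex ≥ (value.length : Int) - 1 then none
      else
        let left := PySem.Chars.strip (PySem.List.slice value none (some dotIndex))
        let right := PySem.Chars.strip (PySem.List.slice value (some (dotIndex + 1)) none)
        if left = [] ∨ right = [] then none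
        else some [String.ofList left, String.ofList right]

-- ===== PORT B =====
-- hand port of value.find('"', j): first index ≥ j holding '"', none if absent (exact: '"' is one code point)
def findQ (cs : List Char) (j : Nat) : Option Nat :=
  if h : j < cs.length then
    if cs[j] = '"' then some j else findQ cs (j + 1)
  else none
termination_by cs.length - j

-- needed by findClose's termination
theorem findQ_bounds (cs : List Char) (j k : Nat) (h : findQ cs j = some k) :
    j ≤ k ∧ k < cs.length := by
  fun_induction findQ cs j <;> simp_all <;> omega

-- port of Source B's _find_closing_quote (its find + while loop)
def findClose (cs : List Char) (j : Nat) : Option Nat :=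
  match h : findQ cs j with
  | none => none
  | some k =>
    if k + 1 < cs.length ∧ cs.getD (k + 1) ' ' = '"' then findClose cs (k + 2)
    else some k
termination_by cs.length - j
decreasing_by have := findQ_bounds cs j k h; omega

-- needed by maskB's termination
theorem findClose_bounds (cs : List Char) (j k : Nat) (h : findClose cs j = some k) :
    j ≤ k ∧ k < cs.length := by
  fun_induction findClose cs j with
  | case1 j hq => simp_all
  | case2 j k' hq hpair ih =>
      have h1 := findQ_bounds cs j k' hq
      have h2 := ih h
      omega
  | case3 j k' hq hpair =>
      have h1 := findQ_bounds cs j k' hq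
      simp_all

-- phase 1 of B: the masked copy of the suffix of value starting at i (none = unbalanced quotes)
def maskB (cs : List Char) (i : Nat) : Option (List Char) :=
  if h : i < cs.length then
    let c := cs[i]
    if c = '"' then
      match h2 : findClose cs (i + 1) with
      | none => none
      | some k => (maskB cs (k + 1)).map (fun rest => List.replicate (k - i + 1) '#' ++ rest)
    else
      (maskB cs (i + 1)).map (fun rest => c :: rest)
  else some []
termination_by cs.length - i
decreasing_by
  · have := findClose_bounds cs (i + 1) k h2; omega
  · omega

def split_qualified_identifier_py_alt (token : String) : Option (List String) :=
  let value := PySem.Chars.strip token.toList   -- token.strip(), on code points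
  if value = [] then none
  else
    match maskB value 0 with
    | none => none
    | some masked =>
      let dots := ((PySem.List.enumerate masked 0).filter (fun pc => pc.2 == '.')).map (·.1)
      if dots.length ≠ 1 then none
      else
        let d := PySem.List.pyGetD dots 0 0   -- dots[0]
        if d = 0 ∨ d = (value.length : Int) - 1 then none
        else
          let left := PySem.Chars.strip (PySem.List.slice value none (some d))
          let right := PySem.Chars.strip (PySem.List.slice value (some (d + 1)) none)
          if left = [] ∨ right = [] then none
          else some [String.ofList left, String.ofList right]

-- ===== PRECONDITION & SPEC =====
def Spec_split_qualified_identifier_py (token : String) (out : Option (List String)) : Prop := out = split_qualified_identifier_py_alt token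
instance (token : String) (out : Option (List String)) : Decidable (Spec_split_qualified_identifier_py token out) := by unfold Spec_split_qualified_identifier_py; infer_instance

-- ===== CLAIM (what is proved, stated in full; the proofs are below) =====
def Claim_equal_split_qualified_identifier_py : Prop := ∀ (token : String), Dom_split_qualified_identifier_py token → Spec_split_qualified_identifier_py token (split_qualified_identifier_py token)

-- ===== LEMMAS AND PROOFS =====

-- step lemmas for loopA
theorem loopA_end (cs : List Char) (i : Nat) (b : Bool) (d : Int) (h : ¬ i < cs.length) :
    loopA cs i b d = some (b, d) := by
  rw [loopA, dif_neg h]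

theorem loopA_quote_open (cs : List Char) (i : Nat) (d : Int)
    (h : i < cs.length) (hc : cs[i] = '"') :
    loopA cs i false d = loopA cs (i + 1) true d := by
  conv_lhs => rw [loopA]
  rw [dif_pos h]
  show (if cs[i] = '"' then _ else _) = _
  rw [if_pos hc, if_neg (by simp)]

theorem loopA_quote_pair (cs : List Char) (i : Nat) (d : Int)
    (h : i < cs.length) (hc : cs[i] = '"')
    (hp : i + 1 < cs.length ∧ cs.getD (i + 1) ' ' = '"') :
    loopA cs i true d = loopA cs (i + 2) true d := by
  conv_lhs => rw [loopA]
  rw [dif_pos h]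
  show (if cs[i] = '"' then _ else _) = _
  rw [if_pos hc, if_pos rfl, if_pos hp]

theorem loopA_quote_close (cs : List Char) (i : Nat) (d : Int)
    (h : i < cs.length) (hc : cs[i] = '"')
    (hp : ¬ (i + 1 < cs.length ∧ cs.getD (i + 1) ' ' = '"')) :
    loopA cs i true d = loopA cs (i + 1) false d := by
  conv_lhs => rw [loopA]
  rw [dif_pos h]
  show (if cs[i] = '"' then _ else _) = _
  rw [if_pos hc, if_pos rfl, if_neg hp]

theorem loopA_inquote_other (cs : List Char) (i : Nat) (d : Int)
    (h : i < cs.length) (hc : ¬ cs[i] = '"') :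
    loopA cs i true d = loopA cs (i + 1) true d := by
  conv_lhs => rw [loopA]
  rw [dif_pos h]
  show (if cs[i] = '"' then _ else _) = _
  rw [if_neg hc]
  show (if cs[i] = '.' ∧ _ then _ else _) = _
  rw [if_neg (by simp)]

theorem loopA_dot_second (cs : List Char) (i : Nat) (d : Int)
    (h : i < cs.length) (hc : cs[i] = '.') (hd : d ≥ 0) :
    loopA cs i false d = none := by
  conv_lhs => rw [loopA]
  rw [dif_pos h]
  show (if cs[i] = '"' then _ else _) = _
  rw [if_neg (by simp [hc]), if_pos ⟨hc, rfl⟩, if_pos hd]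

theorem loopA_dot_first (cs : List Char) (i : Nat) (d : Int)
    (h : i < cs.length) (hc : cs[i] = '.') (hd : ¬ d ≥ 0) :
    loopA cs i false d = loopA cs (i + 1) false (i : Int) := by
  conv_lhs => rw [loopA]
  rw [dif_pos h]
  show (if cs[i] = '"' then _ else _) = _
  rw [if_neg (by simp [hc]), if_pos ⟨hc, rfl⟩, if_neg hd]

theorem loopA_other (cs : List Char) (i : Nat) (d : Int)
    (h : i < cs.length) (hc1 : ¬ cs[i] = '"') (hc2 : ¬ cs[i] = '.') :
    loopA cs i false d = loopA cs (i + 1) false d := by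
  conv_lhs => rw [loopA]
  rw [dif_pos h]
  show (if cs[i] = '"' then _ else _) = _
  rw [if_neg hc1]
  show (if cs[i] = '.' ∧ _ then _ else _) = _
  rw [if_neg (by simp [hc2])]

-- A's in-quote scan skips to the next '"'
theorem findQ_char (cs : List Char) (j k : Nat) (h : findQ cs j = some k) :
    ∃ hk : k < cs.length, cs[k] = '"' := by
  fun_induction findQ cs j <;> simp_all
  omega

theorem loopA_skip_to_quote (cs : List Char) (j : Nat) (d : Int) :
    (∀ k, findQ cs j = some k → loopA cs j true d = loopA cs k true d) ∧
    (findQ cs j = none → loopA cs j true d = some (true, d)) := by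
  fun_induction findQ cs j with
  | case1 j hj hq => simp
  | case2 j hj hq ih =>
      refine ⟨fun k hk => ?_, fun hn => ?_⟩
      · rw [loopA_inquote_other cs j d hj hq]; exact ih.1 k hk
      · rw [loopA_inquote_other cs j d hj hq]; exact ih.2 hn
  | case3 j hj => exact ⟨fun k hk => by simp at hk, fun _ => loopA_end cs j true d hj⟩

-- A's in-quote scan agrees with Source B's closing-quote search
theorem inquote (cs : List Char) (j : Nat) :
    ∀ d : Int,
      (∀ k, findClose cs j = some k → loopA cs j true d = loopA cs (k + 1) false d) ∧
      (findClose cs j = none → loopA cs j true d = some (true, d)) := by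
  fun_induction findClose cs j with
  | case1 j hq =>
      intro d
      exact ⟨fun k hk => by simp at hk, fun _ => (loopA_skip_to_quote cs j d).2 hq⟩
  | case2 j k' hq hpair ih =>
      intro d
      obtain ⟨hk'len, hk'c⟩ := findQ_char cs j k' hq
      have hskip := (loopA_skip_to_quote cs j d).1 k' hq
      have hpairstep := loopA_quote_pair cs k' d hk'len hk'c hpair
      refine ⟨fun k hk => ?_, fun hn => ?_⟩
      · rw [hskip, hpairstep]; exact (ih d).1 k hk
      · rw [hskip, hpairstep]; exact (ih d).2 hn
  | case3 j k' hq hpair =>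
      intro d
      obtain ⟨hk'len, hk'c⟩ := findQ_char cs j k' hq
      refine ⟨fun k hk => ?_, fun hn => by simp at hn⟩
      obtain rfl : k' = k := by simpa using hk
      rw [(loopA_skip_to_quote cs j d).1 k' hq]
      exact loopA_quote_close cs k' d hk'len hk'c hpair

theorem maskB_length (cs : List Char) (i : Nat) :
    ∀ m, maskB cs i = some m → i ≤ cs.length → m.length + i = cs.length := by
  fun_induction maskB cs i with
  | case1 i hi c hq hcl =>
      intro m hm _; simp at hm
  | case2 i hi c hq k hcl ih =>
      intro m hm _
      obtain ⟨rest, hrest, rfl⟩ := Option.map_eq_some_iff.mp hm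
      have hb := findClose_bounds cs (i + 1) k hcl
      have := ih rest hrest (by omega)
      simp; omega
  | case3 i hi c hq ih =>
      intro m hm _
      obtain ⟨rest, hrest, rfl⟩ := Option.map_eq_some_iff.mp hm
      have := ih rest hrest (by omega)
      simp; omega
  | case4 i hi =>
      intro m hm hle
      obtain rfl : ([] : List Char) = m := by simpa using hm
      simp; omega

-- dot positions of a (masked) char list, with absolute offset
def dts : List Char → Int → List Int
  | [], _ => []
  | c :: t, off => if c = '.' then off :: dts t (off + 1) else dts t (off + 1)

-- the value A's loop reaches when started outside quotes with dot state d, given the dots ahead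
def aOut (d : Int) (ds : List Int) : Option (Bool × Int) :=
  match ds with
  | [] => some (false, d)
  | p :: rest => if d < 0 then (if rest = [] then some (false, p) else none) else none

theorem dts_replicate_hash (n : Nat) (rest : List Char) (off : Int) :
    dts (List.replicate n '#' ++ rest) off = dts rest (off + n) := by
  induction n generalizing off with
  | zero => simp
  | succ m ih =>
      simp only [List.replicate_succ, List.cons_append, dts]
      rw [if_neg (by decide), ih]
      push_cast; ring_nf

theorem dts_mem_bounds (m : List Char) (off p : Int) (h : p ∈ dts m off) :
    off ≤ p ∧ p < off + m.length := by
  induction m generalizing off with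
  | nil => simp [dts] at h
  | cons c t ih =>
      by_cases hc : c = '.'
      · simp only [dts, if_pos hc, List.mem_cons] at h
        rcases h with h | h
        · simp; omega
        · have := ih (off + 1) h; simp; omega
      · simp only [dts, if_neg hc] at h
        have := ih (off + 1) h; simp; omega

theorem enum_filter_dts (m : List Char) (off : Int) :
    ((PySem.List.enumerate m off).filter (fun pc => pc.2 == '.')).map (·.1) = dts m off := by
  induction m generalizing off with
  | nil => simp [PySem.List.enumerate_nil, dts]
  | cons c t ih =>
      rw [PySem.List.enumerate_cons]
      by_cases hc : c = '.'
      · simp [hc, dts, ih]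
      · simp [hc, dts, ih]

theorem aOut_nonneg (d : Int) (hd : 0 ≤ d) (ds : List Int) :
    aOut d ds = (if ds = [] then some (false, d) else none) := by
  cases ds with
  | nil => rfl
  | cons p rest => simp [aOut]; omega

-- main simulation: outside quotes, A's loop is determined by B's masked copy
theorem mask_main (cs : List Char) (i : Nat) :
    ∀ d : Int,
      (∀ m, maskB cs i = some m → loopA cs i false d = aOut d (dts m (i : Int))) ∧
      (maskB cs i = none →
        loopA cs i false d = none ∨ ∃ d', loopA cs i false d = some (true, d')) := by
  fun_induction maskB cs i with
  | case1 i hi c hq hcl =>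
      intro d
      refine ⟨fun m hm => by simp at hm, fun _ => ?_⟩
      rw [loopA_quote_open cs i d hi hq]
      exact Or.inr ⟨d, (inquote cs (i + 1) d).2 hcl⟩
  | case2 i hi c hq k hcl ih =>
      intro d
      have hb := findClose_bounds cs (i + 1) k hcl
      have hstep : loopA cs i false d = loopA cs (k + 1) false d := by
        rw [loopA_quote_open cs i d hi hq]
        exact (inquote cs (i + 1) d).1 k hcl
      refine ⟨fun m hm => ?_, fun hn => ?_⟩
      · obtain ⟨rest, hrest, rfl⟩ := Option.map_eq_some_iff.mp hm
        have hoff : ((i : Int) + ((k - i + 1 : Nat) : Int)) = ((k + 1 : Nat) : Int) := by omega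
        rw [hstep, (ih d).1 rest hrest, dts_replicate_hash, hoff]
      · simp only [Option.map_eq_none_iff] at hn
        rw [hstep]
        exact (ih d).2 hn
  | case3 i hi c hq ih =>
      intro d
      by_cases hc : cs[i] = '.'
      · have hcc : c = '.' := hc
        by_cases hd : d ≥ 0
        · refine ⟨fun m hm => ?_, fun _ => Or.inl (loopA_dot_second cs i d hi hc hd)⟩
          obtain ⟨rest, hrest, rfl⟩ := Option.map_eq_some_iff.mp hm
          rw [loopA_dot_second cs i d hi hc hd]
          simp only [dts, if_pos hcc, aOut, if_neg (show ¬ d < 0 by omega)]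
        · have hstep := loopA_dot_first cs i d hi hc hd
          refine ⟨fun m hm => ?_, fun hn => ?_⟩
          · obtain ⟨rest, hrest, rfl⟩ := Option.map_eq_some_iff.mp hm
            have hoff : ((i : Int) + 1) = ((i + 1 : Nat) : Int) := by omega
            rw [hstep, (ih (i : Int)).1 rest hrest,
                aOut_nonneg (i : Int) (by omega) (dts rest ((i + 1 : Nat) : Int))]
            simp only [dts, if_pos hcc, aOut, if_pos (show d < 0 by omega), hoff]
          · simp only [Option.map_eq_none_iff] at hn
            rw [hstep]
            exact (ih (i : Int)).2 hn
      · have hcc : ¬ c = '.' := hc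
        have hstep := loopA_other cs i d hi hq hc
        refine ⟨fun m hm => ?_, fun hn => ?_⟩
        · obtain ⟨rest, hrest, rfl⟩ := Option.map_eq_some_iff.mp hm
          have hoff : ((i + 1 : Nat) : Int) = (i : Int) + 1 := by omega
          rw [hstep, (ih d).1 rest hrest]
          simp only [dts, if_neg hcc, hoff]
        · simp only [Option.map_eq_none_iff] at hn
          rw [hstep]
          exact (ih d).2 hn
  | case4 i hi =>
      intro d
      refine ⟨fun m hm => ?_, fun hn => by simp at hn⟩
      obtain rfl : ([] : List Char) = m := by simpa using hm
      rw [loopA_end cs i false d hi]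
      rfl

-- ===== VERDICT (by name: the statement is the Claim_ definition above) =====
theorem split_qualified_identifier_py_spec : Claim_equal_split_qualified_identifier_py := by
  intro token _
  unfold Spec_split_qualified_identifier_py split_qualified_identifier_py split_qualified_identifier_py_alt
  set value := PySem.Chars.strip token.toList with hv
  by_cases hemp : value = []
  · simp [hemp]
  · simp only [if_neg hemp]
    cases hm : maskB value 0 with
    | none =>
        rcases (mask_main value 0 (-1)).2 hm with hA | ⟨d', hA⟩ <;> simp [hA]
    | some m =>
        have hA := (mask_main value 0 (-1)).1 m hm
        have hlen := maskB_length value 0 m hm (Nat.zero_le _)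
        have hdots := enum_filter_dts m 0
        simp only [Nat.cast_zero] at hA
        cases hds : dts m (0 : Int) with
        | nil =>
            rw [hds] at hA
            simp [hA, aOut, hdots, hds]
        | cons p rest =>
            rw [hds] at hA
            have hpmem : p ∈ dts m (0 : Int) := by rw [hds]; exact List.mem_cons_self
            have hpb := dts_mem_bounds m 0 p hpmem
            cases rest with
            | nil =>
                simp only [aOut, if_pos (show (-1 : Int) < 0 by decide)] at hA
                by_cases hz : p ≤ 0 ∨ p ≥ (value.length : Int) - 1
                · have hcondA : (false || decide (p ≤ 0) || decide (p ≥ (value.length : Int) - 1)) = true := by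
                    simp; omega
                  have hcondB : (p = 0 ∨ p = (value.length : Int) - 1) := by simp at hpb; omega
                  simp [hA, hdots, hds, hcondB, PySem.List.pyGetD]; (intros; exfalso; omega)
                · have hcondA : (false || decide (p ≤ 0) || decide (p ≥ (value.length : Int) - 1)) = false := by
                    simp; omega
                  have hcondB : ¬ (p = 0 ∨ p = (value.length : Int) - 1) := by omega
                  simp [hA, hdots, hds, hcondB, PySem.List.pyGetD]; (intros; exfalso; omega)
            | cons q rest' =>
                rw [show aOut (-1) (p :: q :: rest') = none by simp [aOut]] at hA
                simp [hA, hdots, hds]
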